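-- pv_equiv track=rewrite | github.com/elek/codejam | codejam/2010/10r1a/rotate/start.py | check
-- ===== SOURCE A (Python) =====
-- def check(l):
--    base = l[0]
--    if base == '.':
--       return None
--    for i in range(1,len(l)):
--       if l[i] != base:
--          return None
--    return base
-- ===== SOURCE B (Python) =====
-- def check(l):
--     base = l[0]
--     if base == '.':
--         return None
--     return base if min(l) == max(l) else None
-- ===== Notes on version B (the rewrite author's own statement) =====
-- stated objective: alternative
-- what changed: B decides 'all elements equal' by an order-based aggregate -- it computes min(l) and max(l) and returns base iff they coincide (and base != '.') -- instead of A's element-by-element scan comparing every item against the pivot l[0].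
import Mathlib
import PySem

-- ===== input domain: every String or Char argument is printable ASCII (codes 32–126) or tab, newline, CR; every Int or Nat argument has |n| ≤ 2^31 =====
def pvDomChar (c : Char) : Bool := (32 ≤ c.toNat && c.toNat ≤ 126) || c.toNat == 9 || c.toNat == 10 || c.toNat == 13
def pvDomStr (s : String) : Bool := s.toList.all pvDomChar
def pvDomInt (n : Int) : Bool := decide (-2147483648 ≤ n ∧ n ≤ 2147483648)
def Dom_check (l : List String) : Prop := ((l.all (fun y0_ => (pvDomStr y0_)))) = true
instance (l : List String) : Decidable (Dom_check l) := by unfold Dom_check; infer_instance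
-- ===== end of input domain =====

-- B decides "all elements equal" by an order-based aggregate — min(l) == max(l) —
-- instead of A's element-by-element scan against the pivot l[0]; same O(n) cost.

-- ===== PORT A =====
-- A's loop 'for i in range(1, len(l)): if l[i] != base: return None' over the tail of l
def checkLoopA (base : String) : List String → Option String
  | [] => some base
  | x :: xs => if x ≠ base then none else checkLoopA base xs

def check (l : List String) : Option String :=
  match PySem.List.pyGet? l 0 with
  | none => none          -- unreachable under Pre_check (Python raises IndexError on [])
  | some base => if base = "." then none else checkLoopA base (PySem.List.slice l (some 1) none)

-- ===== PORT B =====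
def check_alt (l : List String) : Option String :=
  match PySem.List.pyGet? l 0 with
  | none => none          -- unreachable under Pre_check (Python raises IndexError on [])
  | some base =>
    if base = "." then none
    else
      match PySem.List.min? l (fun x => x), PySem.List.max? l (fun x => x) with
      | some m, some M => if m = M then some base else none
      | _, _ => none      -- unreachable: l is nonempty here

-- ===== PRECONDITION & SPEC =====
-- A raises IndexError on the empty list (l[0]); B raises there too (min of empty sequence).
def Pre_check (l : List String) : Prop := l ≠ []
instance (l : List String) : Decidable (Pre_check l) := by unfold Pre_check; infer_instance
def pvWitness_check : List String := (["a", "a"])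
def Spec_check (l : List String) (out : Option String) : Prop := out = check_alt l
instance (l : List String) (out : Option String) : Decidable (Spec_check l out) := by unfold Spec_check; infer_instance

-- ===== CLAIM (what is proved, stated in full; the proofs are below) =====
def Claim_equal_check : Prop := ∀ (l : List String), Dom_check l → Pre_check l → Spec_check l (check l)

-- ===== LEMMAS AND PROOFS =====

theorem checkLoopA_eq_some_iff (base : String) (t : List String) :
    checkLoopA base t = some base ↔ ∀ x ∈ t, x = base := by
  induction t with
  | nil => simp [checkLoopA]
  | cons x xs ih =>
    by_cases hx : x = base
    · simp [checkLoopA, hx, ih]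
    · simp [checkLoopA, hx]

theorem checkLoopA_eq_none_or (base : String) (t : List String) :
    checkLoopA base t = some base ∨ checkLoopA base t = none := by
  induction t with
  | nil => simp [checkLoopA]
  | cons x xs ih =>
    by_cases hx : x = base
    · simpa [checkLoopA, hx] using ih
    · simp [checkLoopA, hx]

-- min(l) = max(l) exactly when every element equals the head
theorem min_eq_max_iff (b : String) (t : List String) :
    t.foldl min b = t.foldl max b ↔ ∀ x ∈ t, x = b := by
  constructor
  · intro h x hx
    have hmin : PySem.List.min? (b :: t) (fun y => y) = some (t.foldl min b) :=
      PySem.List.min?_id_cons b t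
    have hmax : PySem.List.max? (b :: t) (fun y => y) = some (t.foldl max b) :=
      PySem.List.max?_id_cons b t
    have hlo := PySem.List.min?_isMin hmin
    have hhi := PySem.List.max?_isMax hmax
    have hxlo : t.foldl min b ≤ x := hlo x (by simp [hx])
    have hxhi : x ≤ t.foldl max b := hhi x (by simp [hx])
    have hblo : t.foldl min b ≤ b := hlo b (by simp)
    have hbhi : b ≤ t.foldl max b := hhi b (by simp)
    rw [h] at hxlo hblo
    exact (le_antisymm hxhi hxlo).trans (le_antisymm hblo hbhi)
  · intro h
    have : ∀ (f : String → String → String), (∀ y, f y y = y) →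
        t.foldl f b = b := by
      intro f hf
      induction t with
      | nil => rfl
      | cons y ys ih =>
        have hy : y = b := h y (by simp)
        simp only [List.foldl, hy, hf]
        exact ih (fun z hz => h z (by simp [hz]))
    rw [this min (fun y => min_self y), this max (fun y => max_self y)]

theorem check_eq_alt (l : List String) (hl : l ≠ []) : check l = check_alt l := by
  obtain ⟨b, t, rfl⟩ := List.exists_cons_of_ne_nil hl
  have h0 : PySem.List.pyGet? (b :: t) 0 = some b := by
    simp [PySem.List.pyGet?, PySem.List.pyIdx?]
  have hslice : PySem.List.slice (b :: t) (some 1) none = t :=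
    PySem.List.slice_from_one (b :: t)
  have hmin : PySem.List.min? (b :: t) (fun y => y) = some (t.foldl min b) :=
    PySem.List.min?_id_cons b t
  have hmax : PySem.List.max? (b :: t) (fun y => y) = some (t.foldl max b) :=
    PySem.List.max?_id_cons b t
  simp only [check, check_alt, h0, hslice, hmin, hmax]
  by_cases hb : b = "."
  · simp [hb]
  · by_cases hall : ∀ x ∈ t, x = b
    · rw [(checkLoopA_eq_some_iff b t).mpr hall, (min_eq_max_iff b t).mpr hall]
      simp [hb]
    · have hnone : checkLoopA b t = none := by
        rcases checkLoopA_eq_none_or b t with h | h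
        · exact absurd ((checkLoopA_eq_some_iff b t).mp h) hall
        · exact h
      have hne : t.foldl min b ≠ t.foldl max b := fun h =>
        hall ((min_eq_max_iff b t).mp h)
      simp [hb, hnone, hne]

-- ===== VERDICT =====
theorem check_spec : Claim_equal_check := by
  intro l _ hpre
  unfold Spec_check
  exact check_eq_alt l hpre
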